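-- pv_equiv track=rewrite | github.com/hanis26/computational_phys | hw2.py | cardinal_eig
-- ===== SOURCE A (Python) =====
-- import itertools
--
-- def find_triples(n_x, n_y, n_z):
--     tuples = list(itertools.permutations([n_x, n_y, n_z]))
--     distinct_tuples = []
--     for tpl in tuples:
--         if tpl not in distinct_tuples:
--             distinct_tuples.append(tpl)
--     return distinct_tuples
--
-- def cardinal_eig(n):
--     eigenvectors = []
--     for i in range(1, n):
--         for j in range(1, n):
--             for k in range(1, n):
--                 if i**2 + j**2 + k**2 == n:
--                     eigenvectors.extend(find_triples(i, j, k))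
--     return eigenvectors
-- ===== SOURCE B (Python) =====
-- def _isqrt(m):
--     k = 0
--     while (k + 1) * (k + 1) <= m:
--         k += 1
--     return k
--
-- def _distinct_perms(i, j, k):
--     if i == j and j == k:
--         return [(i, i, i)]
--     if i == j:
--         return [(i, i, k), (i, k, i), (k, i, i)]
--     if j == k:
--         return [(i, j, j), (j, i, j), (j, j, i)]
--     if i == k:
--         return [(i, j, i), (i, i, j), (j, i, i)]
--     return [(i, j, k), (i, k, j), (j, i, k), (j, k, i), (k, i, j), (k, j, i)]
--
-- def cardinal_eig(n):
--     s = _isqrt(n)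
--     eigenvectors = []
--     for i in range(1, s + 1):
--         ii = i * i
--         for j in range(1, s + 1):
--             r = n - ii - j * j
--             if r >= 1:
--                 k = _isqrt(r)
--                 if k * k == r:
--                     eigenvectors.extend(_distinct_perms(i, j, k))
--     return eigenvectors
-- ===== Notes on version B (the rewrite author's own statement) =====
-- stated objective: faster
-- what changed: Instead of scanning all candidate triples with three nested loops below n, B iterates i and j only up to the integer square root of n and solves for k by a perfect-square test, emitting the distinct permutations of each hit by direct case analysis on equalities instead of generating and deduplicating all permutations.
import Mathlib
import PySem

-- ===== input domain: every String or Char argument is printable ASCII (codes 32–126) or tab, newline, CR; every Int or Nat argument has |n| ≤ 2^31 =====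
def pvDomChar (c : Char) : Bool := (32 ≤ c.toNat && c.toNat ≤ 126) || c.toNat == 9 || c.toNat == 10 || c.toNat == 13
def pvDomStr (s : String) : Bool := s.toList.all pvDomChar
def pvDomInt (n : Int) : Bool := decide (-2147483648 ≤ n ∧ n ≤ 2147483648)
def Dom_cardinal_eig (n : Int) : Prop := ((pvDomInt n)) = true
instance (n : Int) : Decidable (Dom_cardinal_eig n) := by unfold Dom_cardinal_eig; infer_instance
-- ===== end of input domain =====

-- B replaces A's three nested scans below n by an i,j scan up to the integer square root of n
-- with a perfect-square test solving for k, emitting the distinct permutations by direct case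
-- analysis (objective: faster).

-- ===== PORT A =====
def find_triples (a b c : Int) : List (List Int) :=
  (PySem.List.permutations [a, b, c] 3).foldl
    (fun acc t => if t ∈ acc then acc else acc ++ [t]) []

def cardinal_eig (n : Int) : List (List Int) :=
  (PySem.List.pyRange 1 n 1).foldl (fun acc i =>
    (PySem.List.pyRange 1 n 1).foldl (fun acc j =>
      (PySem.List.pyRange 1 n 1).foldl (fun acc k =>
        if i ^ 2 + j ^ 2 + k ^ 2 = n then acc ++ find_triples i j k else acc) acc) acc) []

-- ===== PORT B =====
-- transliteration of Source B's _isqrt: k = 0; while (k+1)*(k+1) <= m: k += 1; return k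
def pvIsqrtGo (m k : Int) : Int :=
  if (k + 1) * (k + 1) ≤ m then pvIsqrtGo m (k + 1) else k
termination_by (m - k).toNat
decreasing_by
  have hk : k < m := by nlinarith [sq_nonneg (2 * k + 1)]
  omega

def pvIsqrt (m : Int) : Int := pvIsqrtGo m 0

def pvDistinctPerms (i j k : Int) : List (List Int) :=
  if i = j ∧ j = k then [[i, i, i]]
  else if i = j then [[i, i, k], [i, k, i], [k, i, i]]
  else if j = k then [[i, j, j], [j, i, j], [j, j, i]]
  else if i = k then [[i, j, i], [i, i, j], [j, i, i]]
  else [[i, j, k], [i, k, j], [j, i, k], [j, k, i], [k, i, j], [k, j, i]]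

def cardinal_eig_alt (n : Int) : List (List Int) :=
  let s := pvIsqrt n
  (PySem.List.pyRange 1 (s + 1) 1).foldl (fun acc i =>
    let ii := i * i
    (PySem.List.pyRange 1 (s + 1) 1).foldl (fun acc j =>
      let r := n - ii - j * j
      if 1 ≤ r then
        let k := pvIsqrt r
        if k * k = r then acc ++ pvDistinctPerms i j k else acc
      else acc) acc) []

-- ===== PRECONDITION & SPEC =====
def Spec_cardinal_eig (n : Int) (out : List (List Int)) : Prop := out = cardinal_eig_alt n
instance (n : Int) (out : List (List Int)) : Decidable (Spec_cardinal_eig n out) := by unfold Spec_cardinal_eig; infer_instance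

-- ===== CLAIM (what is proved, stated in full; the proofs are below) =====
def Claim_equal_cardinal_eig : Prop := ∀ (n : Int), Dom_cardinal_eig n → Spec_cardinal_eig n (cardinal_eig n)

-- ===== LEMMAS AND PROOFS =====

theorem pvIsqrtGo_spec (m k : Int) (hk : 0 ≤ k) (hkm : k * k ≤ m) :
    0 ≤ pvIsqrtGo m k ∧ pvIsqrtGo m k * pvIsqrtGo m k ≤ m ∧
      m < (pvIsqrtGo m k + 1) * (pvIsqrtGo m k + 1) := by
  induction k using pvIsqrtGo.induct m with
  | case1 k h ih =>
    rw [pvIsqrtGo, if_pos h]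
    exact ih (by omega) h
  | case2 k h =>
    rw [pvIsqrtGo, if_neg h]
    exact ⟨hk, hkm, by omega⟩

theorem pvIsqrt_spec (m : Int) (hm : 0 ≤ m) :
    0 ≤ pvIsqrt m ∧ pvIsqrt m * pvIsqrt m ≤ m ∧ m < (pvIsqrt m + 1) * (pvIsqrt m + 1) :=
  pvIsqrtGo_spec m 0 le_rfl (by simpa using hm)

theorem pvIsqrt_of_neg (m : Int) (h : m < 1) : pvIsqrt m = 0 := by
  rw [pvIsqrt, pvIsqrtGo]
  norm_num
  omega

-- a k ≥ 1 with k*k = r is exactly isqrt r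
theorem pvIsqrt_eq_of_sq (r k : Int) (hk : 1 ≤ k) (h : k * k = r) : pvIsqrt r = k := by
  have h1 : (0:Int) ≤ r := by nlinarith
  obtain ⟨h2, h3, h4⟩ := pvIsqrt_spec r h1
  set t := pvIsqrt r with ht
  by_contra hne
  rcases lt_or_gt_of_ne hne with hlt | hgt
  · have : t + 1 ≤ k := by omega
    nlinarith
  · have : k + 1 ≤ t := by omega
    nlinarith

theorem perms3 (a b c : Int) :
    PySem.List.permutations [a, b, c] 3 =
      [[a,b,c],[a,c,b],[b,a,c],[b,c,a],[c,a,b],[c,b,a]] := by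
  simp [PySem.List.permutations, List.range_succ, List.flatMap]

theorem find_triples_eq (a b c : Int) : find_triples a b c = pvDistinctPerms a b c := by
  rw [find_triples, perms3]
  by_cases hab : a = b <;> by_cases hbc : b = c <;> by_cases hac : a = c <;>
    simp_all [pvDistinctPerms, List.foldl]

-- the per-(i,j) contribution of A's innermost k-loop
def pvHitA (n i j : Int) : List (List Int) :=
  (PySem.List.pyRange 1 n 1).flatMap
    (fun k => if i ^ 2 + j ^ 2 + k ^ 2 = n then find_triples i j k else [])

-- the per-(i,j) contribution of B's body
def pvHitB (n i j : Int) : List (List Int) :=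
  if 1 ≤ n - i * i - j * j ∧
      pvIsqrt (n - i * i - j * j) * pvIsqrt (n - i * i - j * j) = n - i * i - j * j
  then pvDistinctPerms i j (pvIsqrt (n - i * i - j * j)) else []

theorem foldl_ite_append {α : Type} (l : List α) (p : α → Prop) [DecidablePred p]
    (f : α → List (List Int)) (acc : List (List Int)) :
    l.foldl (fun acc k => if p k then acc ++ f k else acc) acc
      = acc ++ l.flatMap (fun k => if p k then f k else []) := by
  have h : (fun (acc : List (List Int)) k => if p k then acc ++ f k else acc)
      = fun acc k => acc ++ (if p k then f k else []) := by
    funext acc k; split <;> simp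
  rw [h, PySem.List.foldl_append_eq_flatMap]

theorem cardinal_eig_shape (n : Int) :
    cardinal_eig n = (PySem.List.pyRange 1 n 1).flatMap (fun i =>
      (PySem.List.pyRange 1 n 1).flatMap (fun j => pvHitA n i j)) := by
  have h1 : ∀ i (acc : List (List Int)),
      (PySem.List.pyRange 1 n 1).foldl (fun acc j =>
        (PySem.List.pyRange 1 n 1).foldl (fun acc k =>
          if i ^ 2 + j ^ 2 + k ^ 2 = n then acc ++ find_triples i j k else acc) acc) acc
      = acc ++ (PySem.List.pyRange 1 n 1).flatMap (fun j => pvHitA n i j) := by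
    intro i acc
    have h2 : (fun (acc : List (List Int)) j =>
        (PySem.List.pyRange 1 n 1).foldl (fun acc k =>
          if i ^ 2 + j ^ 2 + k ^ 2 = n then acc ++ find_triples i j k else acc) acc)
        = fun acc j => acc ++ pvHitA n i j := by
      funext acc j
      exact foldl_ite_append _ _ _ _
    rw [h2, PySem.List.foldl_append_eq_flatMap]
  have h3 : (fun (acc : List (List Int)) i =>
      (PySem.List.pyRange 1 n 1).foldl (fun acc j =>
        (PySem.List.pyRange 1 n 1).foldl (fun acc k =>
          if i ^ 2 + j ^ 2 + k ^ 2 = n then acc ++ find_triples i j k else acc) acc) acc)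
      = fun acc i => acc ++ (PySem.List.pyRange 1 n 1).flatMap (fun j => pvHitA n i j) := by
    funext acc i; exact h1 i acc
  rw [cardinal_eig, h3, PySem.List.foldl_append_eq_flatMap]
  simp

theorem cardinal_eig_alt_shape (n : Int) :
    cardinal_eig_alt n = (PySem.List.pyRange 1 (pvIsqrt n + 1) 1).flatMap (fun i =>
      (PySem.List.pyRange 1 (pvIsqrt n + 1) 1).flatMap (fun j => pvHitB n i j)) := by
  have h1 : ∀ i (acc : List (List Int)),
      (PySem.List.pyRange 1 (pvIsqrt n + 1) 1).foldl (fun acc j =>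
        if 1 ≤ n - i * i - j * j then
          (if pvIsqrt (n - i * i - j * j) * pvIsqrt (n - i * i - j * j) = n - i * i - j * j
            then acc ++ pvDistinctPerms i j (pvIsqrt (n - i * i - j * j)) else acc)
        else acc) acc
      = acc ++ (PySem.List.pyRange 1 (pvIsqrt n + 1) 1).flatMap (fun j => pvHitB n i j) := by
    intro i acc
    have h2 : (fun (acc : List (List Int)) j =>
        if 1 ≤ n - i * i - j * j then
          (if pvIsqrt (n - i * i - j * j) * pvIsqrt (n - i * i - j * j) = n - i * i - j * j
            then acc ++ pvDistinctPerms i j (pvIsqrt (n - i * i - j * j)) else acc)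
        else acc)
        = fun acc j => acc ++ pvHitB n i j := by
      funext acc j
      rw [pvHitB]
      split_ifs <;> simp_all
    rw [h2, PySem.List.foldl_append_eq_flatMap]
  have h3 : (fun (acc : List (List Int)) i =>
      (PySem.List.pyRange 1 (pvIsqrt n + 1) 1).foldl (fun acc j =>
        if 1 ≤ n - i * i - j * j then
          (if pvIsqrt (n - i * i - j * j) * pvIsqrt (n - i * i - j * j) = n - i * i - j * j
            then acc ++ pvDistinctPerms i j (pvIsqrt (n - i * i - j * j)) else acc)
        else acc) acc)
      = fun acc i => acc ++ (PySem.List.pyRange 1 (pvIsqrt n + 1) 1).flatMap (fun j => pvHitB n i j) := by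
    funext acc i; exact h1 i acc
  rw [cardinal_eig_alt]
  rw [h3, PySem.List.foldl_append_eq_flatMap]
  simp

-- central lemma: for i, j ≥ 1 A's k-loop contributes exactly B's solved-k contribution
theorem hit_eq (n i j : Int) (hi : 1 ≤ i) (hj : 1 ≤ j) : pvHitA n i j = pvHitB n i j := by
  set r := n - i * i - j * j with hr
  have hsq : ∀ k : Int, i ^ 2 + j ^ 2 + k ^ 2 = n ↔ k * k = r := by
    intro k
    rw [hr]
    constructor <;> intro h <;> nlinarith
  by_cases hc : 1 ≤ r ∧ pvIsqrt r * pvIsqrt r = r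
  · obtain ⟨hr1, hk0⟩ := hc
    set k0 := pvIsqrt r with hk0def
    have hk0pos : 1 ≤ k0 := by
      obtain ⟨h2, h3, h4⟩ := pvIsqrt_spec r (by omega)
      rw [← hk0def] at h2 h3 h4
      nlinarith
    have hk0n : k0 < n := by nlinarith
    rw [pvHitA]
    rw [PySem.List.pyRange_one_append 1 k0 n (by omega) (by omega),
        PySem.List.pyRange_one_cons hk0n, List.flatMap_append, List.flatMap_cons]
    have hleft : (PySem.List.pyRange 1 k0 1).flatMap
        (fun k => if i ^ 2 + j ^ 2 + k ^ 2 = n then find_triples i j k else []) = [] := by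
      rw [List.flatMap_eq_nil_iff]
      intro x hx
      rw [PySem.List.mem_pyRange_one] at hx
      rw [if_neg]
      rw [hsq]
      nlinarith [hx.1, hx.2]
    have hright : (PySem.List.pyRange (k0 + 1) n 1).flatMap
        (fun k => if i ^ 2 + j ^ 2 + k ^ 2 = n then find_triples i j k else []) = [] := by
      rw [List.flatMap_eq_nil_iff]
      intro x hx
      rw [PySem.List.mem_pyRange_one] at hx
      rw [if_neg]
      rw [hsq]
      nlinarith [hx.1, hx.2]
    rw [hleft, hright, if_pos ((hsq k0).mpr hk0)]
    rw [pvHitB, ← hr, ← hk0def, if_pos ⟨hr1, hk0⟩, find_triples_eq]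
    simp
  · rw [pvHitB, ← hr, if_neg hc, pvHitA, List.flatMap_eq_nil_iff]
    intro x hx
    rw [PySem.List.mem_pyRange_one] at hx
    rw [if_neg]
    intro hcond
    rw [hsq] at hcond
    have hx1 : pvIsqrt r = x := pvIsqrt_eq_of_sq r x hx.1 hcond
    exact hc ⟨by nlinarith [hx.1], by rw [hx1]; exact hcond⟩

-- a flatMap over [1,c) shrinks to [1,b) when the tail contributes nothing
theorem flatMap_shrink (b c : Int) (hb : 1 ≤ b) (hbc : b ≤ c) (f : Int → List (List Int))
    (h : ∀ x, b ≤ x → x < c → f x = []) :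
    (PySem.List.pyRange 1 c 1).flatMap f = (PySem.List.pyRange 1 b 1).flatMap f := by
  rw [PySem.List.pyRange_one_append 1 b c hb hbc, List.flatMap_append]
  have : (PySem.List.pyRange b c 1).flatMap f = [] := by
    rw [List.flatMap_eq_nil_iff]
    intro x hx
    rw [PySem.List.mem_pyRange_one] at hx
    exact h x hx.1 hx.2
  rw [this, List.append_nil]

-- ===== VERDICT (by name: the statement is the Claim_ definition above) =====
theorem cardinal_eig_spec : Claim_equal_cardinal_eig := by
  intro n _
  show cardinal_eig n = cardinal_eig_alt n
  rw [cardinal_eig_shape, cardinal_eig_alt_shape]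
  rcases lt_trichotomy n 1 with hn | hn | hn
  · rw [pvIsqrt_of_neg n hn,
        PySem.List.pyRange_one_eq_nil (show n ≤ 1 by omega),
        PySem.List.pyRange_one_eq_nil (show (0:Int) + 1 ≤ 1 by norm_num)]
    rfl
  · subst hn
    have hs : pvIsqrt 1 = 1 := pvIsqrt_eq_of_sq 1 1 le_rfl (by norm_num)
    rw [hs, PySem.List.pyRange_one_eq_nil le_rfl]
    norm_num [PySem.List.pyRange_one_singleton, pvHitB]
    intro x hx1 hx2 y hy1 hy2 h5
    exact absurd h5 (by nlinarith)
  · obtain ⟨hs0, hs1, hs2⟩ := pvIsqrt_spec n (by omega)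
    set s := pvIsqrt n with hsdef
    have hspos : 1 ≤ s := by nlinarith
    have hsn : s + 1 ≤ n := by nlinarith
    have hbig : ∀ i j k : Int, s + 1 ≤ i → 1 ≤ j → 1 ≤ k →
        i ^ 2 + j ^ 2 + k ^ 2 ≠ n := by
      intro i j k h1 h2 h3 h
      nlinarith
    have htailA : ∀ i : Int, 1 ≤ i → ∀ x, s + 1 ≤ x → x < n → pvHitA n i x = [] := by
      intro i hi x hx _
      rw [pvHitA, List.flatMap_eq_nil_iff]
      intro k hk
      rw [PySem.List.mem_pyRange_one] at hk
      rw [if_neg]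
      intro h
      nlinarith [hk.1]
    have houter : ∀ x, s + 1 ≤ x → x < n →
        (PySem.List.pyRange 1 n 1).flatMap (fun j => pvHitA n x j) = [] := by
      intro x hx hxn
      rw [List.flatMap_eq_nil_iff]
      intro j hj
      rw [PySem.List.mem_pyRange_one] at hj
      rw [pvHitA, List.flatMap_eq_nil_iff]
      intro k hk
      rw [PySem.List.mem_pyRange_one] at hk
      exact if_neg (hbig x j k hx hj.1 hk.1)
    rw [flatMap_shrink (s + 1) n (by omega) hsn _ houter]
    apply List.flatMap_congr
    intro i hi
    rw [PySem.List.mem_pyRange_one] at hi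
    rw [flatMap_shrink (s + 1) n (by omega) hsn _ (htailA i hi.1)]
    exact List.flatMap_congr fun j hj =>
      hit_eq n i j hi.1 ((PySem.List.mem_pyRange_one).mp hj).1
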